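-- pv_equiv track=rewrite | github.com/gulzeki96/video-metin-i-eri-i-zetleme-denemeleri | vers_1.py | sentence_score
-- ===== SOURCE A (Python) =====
-- def sentence_score(mergeSentences,score1,score2,score3):
--     sentenceScore = []
--     counter =0
--     for sent in mergeSentences:
--         sentenceScore.append(0)
--         i=0
--         for i in range (len(score1)):
--             if(sent.find(score1[i][0])>=0):
--                 sentenceScore[counter]+= score1[i][1]
--         i=0
--         for i in range (len(score2)):
--             if(sent.find(score2[i][0])>=0):
--                 sentenceScore[counter]+= score2[i][1]
--         i=0
--         for i in range (len(score3)):
--             if(sent.find(score3[i][0])>=0):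
--                 sentenceScore[counter]+= score3[i][1]
--         counter+=1
--     return sentenceScore
-- ===== SOURCE B (Python) =====
-- def sentence_score(mergeSentences, score1, score2, score3):
--     # Index each sentence's substrings (only the keyword lengths that occur) in a set,
--     # so every keyword is checked by one hash lookup instead of a scan.
--     keywords = score1 + score2 + score3
--     lengths = {len(k) for k, _ in keywords}
--     result = []
--     for sent in mergeSentences:
--         subs = {sent[i:i + n] for n in lengths for i in range(len(sent) - n + 1)}
--         result.append(sum(w for k, w in keywords if k in subs))
--     return result
-- ===== Notes on version B (the rewrite author's own statement) =====
-- stated objective: faster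
-- what changed: Instead of running str.find for every keyword on every sentence, B builds per sentence a hash set of the sentence's substrings at exactly the keyword lengths that occur, then scores each keyword by a single set-membership lookup over the concatenated keyword list.
import Mathlib
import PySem

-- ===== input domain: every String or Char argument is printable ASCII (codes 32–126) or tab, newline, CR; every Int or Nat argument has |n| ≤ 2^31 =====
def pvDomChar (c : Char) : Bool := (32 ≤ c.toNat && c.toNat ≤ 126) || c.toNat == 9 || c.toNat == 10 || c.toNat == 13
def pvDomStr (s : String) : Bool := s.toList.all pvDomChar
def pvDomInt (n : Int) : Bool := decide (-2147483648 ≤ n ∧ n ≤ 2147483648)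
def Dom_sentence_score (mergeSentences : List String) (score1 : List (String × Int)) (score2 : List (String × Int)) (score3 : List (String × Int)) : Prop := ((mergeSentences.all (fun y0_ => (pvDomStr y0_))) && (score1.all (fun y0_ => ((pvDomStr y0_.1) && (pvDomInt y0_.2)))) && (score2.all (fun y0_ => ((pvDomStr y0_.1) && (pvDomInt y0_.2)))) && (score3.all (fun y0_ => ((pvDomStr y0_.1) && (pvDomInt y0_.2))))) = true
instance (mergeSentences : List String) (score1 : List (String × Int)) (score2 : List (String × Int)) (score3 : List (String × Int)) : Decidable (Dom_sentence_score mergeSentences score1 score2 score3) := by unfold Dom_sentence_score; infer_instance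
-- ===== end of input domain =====

-- B replaces A's per-sentence str.find scan over every keyword by a per-sentence SET of the
-- sentence's substrings (only at the keyword lengths that occur), so each keyword costs one
-- set-membership lookup instead of a scan; measured faster in a timing run.

-- ===== PORT A =====
def sentence_score (mergeSentences : List String) (score1 : List (String × Int)) (score2 : List (String × Int)) (score3 : List (String × Int)) : List Int :=
  (mergeSentences.foldl
    (fun (st : List Int × Int) sent =>
      let sentenceScore := st.1 ++ [0]
      let counter := st.2
      let sentenceScore := (PySem.List.pyRange 0 (score1.length : Int)).foldl
        (fun ss i =>
          if 0 ≤ PySem.Str.find sent (PySem.List.pyGetD score1 i ("", 0)).1 then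
            PySem.List.pySetD ss counter (PySem.List.pyGetD ss counter 0 + (PySem.List.pyGetD score1 i ("", 0)).2)
          else ss) sentenceScore
      let sentenceScore := (PySem.List.pyRange 0 (score2.length : Int)).foldl
        (fun ss i =>
          if 0 ≤ PySem.Str.find sent (PySem.List.pyGetD score2 i ("", 0)).1 then
            PySem.List.pySetD ss counter (PySem.List.pyGetD ss counter 0 + (PySem.List.pyGetD score2 i ("", 0)).2)
          else ss) sentenceScore
      let sentenceScore := (PySem.List.pyRange 0 (score3.length : Int)).foldl
        (fun ss i =>
          if 0 ≤ PySem.Str.find sent (PySem.List.pyGetD score3 i ("", 0)).1 then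
            PySem.List.pySetD ss counter (PySem.List.pyGetD ss counter 0 + (PySem.List.pyGetD score3 i ("", 0)).2)
          else ss) sentenceScore
      (sentenceScore, counter + 1))
    ([], 0)).1

-- ===== PORT B =====
def sentence_score_alt (mergeSentences : List String) (score1 : List (String × Int)) (score2 : List (String × Int)) (score3 : List (String × Int)) : List Int :=
  let keywords := score1 ++ score2 ++ score3
  let lengths : PySem.Set Int := PySem.Set.ofList (keywords.map (fun p => PySem.Str.len p.1))
  mergeSentences.map (fun sent =>
    let subs : PySem.Set String :=
      List.foldl (fun acc n =>
        (PySem.List.pyRange 0 (PySem.Str.len sent - n + 1)).foldl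
          (fun acc2 i => PySem.Set.add acc2 (PySem.Str.slice sent (some i) (some (i + n)))) acc)
        PySem.Set.empty lengths
    keywords.foldl (fun t p => if PySem.Set.contains subs p.1 then t + p.2 else t) 0)

-- ===== PRECONDITION & SPEC =====
def Spec_sentence_score (mergeSentences : List String) (score1 : List (String × Int)) (score2 : List (String × Int)) (score3 : List (String × Int)) (out : List Int) : Prop := out = sentence_score_alt mergeSentences score1 score2 score3
instance (mergeSentences : List String) (score1 : List (String × Int)) (score2 : List (String × Int)) (score3 : List (String × Int)) (out : List Int) : Decidable (Spec_sentence_score mergeSentences score1 score2 score3 out) := by unfold Spec_sentence_score; infer_instance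

-- ===== CLAIM (what is proved, stated in full; the proofs are below) =====
def Claim_equal_sentence_score : Prop := ∀ (mergeSentences : List String) (score1 : List (String × Int)) (score2 : List (String × Int)) (score3 : List (String × Int)), Dom_sentence_score mergeSentences score1 score2 score3 → Spec_sentence_score mergeSentences score1 score2 score3 (sentence_score mergeSentences score1 score2 score3)

-- ===== LEMMAS AND PROOFS =====

-- A's += on the last slot: folding the "if hit, bump sentenceScore[counter]" update over any list,
-- starting from pre ++ [v] with counter = pre.length, just folds the bump into the last cell.
lemma pv_foldl_setLast {α : Type} (l : List α) (p : α → Prop) [DecidablePred p] (w : α → Int)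
    (pre : List Int) (v : Int) :
    l.foldl (fun ss x => if p x then
        PySem.List.pySetD ss (pre.length : Int) (PySem.List.pyGetD ss (pre.length : Int) 0 + w x)
      else ss) (pre ++ [v])
    = pre ++ [l.foldl (fun t x => if p x then t + w x else t) v] := by
  induction l generalizing v with
  | nil => rfl
  | cons x xs ih =>
    simp only [List.foldl_cons]
    by_cases h : p x
    · rw [if_pos h, if_pos h]
      have hg : PySem.List.pyGetD (pre ++ [v]) (pre.length : Int) 0 = v := by
        simp [PySem.List.pyGetD_natCast, List.getD]
      have hs : PySem.List.pySetD (pre ++ [v]) (pre.length : Int) (v + w x) = pre ++ [v + w x] := by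
        simp [PySem.List.pySetD_natCast]
      rw [hg, hs, ih]
    · rw [if_neg h, if_neg h, ih]

-- one of A's three index loops over a score list, from state pre ++ [v]
lemma pv_inner (sent : String) (sc : List (String × Int)) (pre : List Int) (v : Int) :
    (PySem.List.pyRange 0 (sc.length : Int)).foldl
      (fun ss i =>
        if 0 ≤ PySem.Str.find sent (PySem.List.pyGetD sc i ("", 0)).1 then
          PySem.List.pySetD ss (pre.length : Int) (PySem.List.pyGetD ss (pre.length : Int) 0 + (PySem.List.pyGetD sc i ("", 0)).2)
        else ss) (pre ++ [v])
    = pre ++ [sc.foldl (fun t q => if 0 ≤ PySem.Str.find sent q.1 then t + q.2 else t) v] := by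
  rw [PySem.List.foldl_pyRange_zero_pyGetD' sc ("", 0)
    (fun ss q => if 0 ≤ PySem.Str.find sent q.1 then
        PySem.List.pySetD ss (pre.length : Int) (PySem.List.pyGetD ss (pre.length : Int) 0 + q.2)
      else ss) (pre ++ [v])]
  exact pv_foldl_setLast sc (fun q => 0 ≤ PySem.Str.find sent q.1) (fun q => q.2) pre v

-- membership in a fold that adds f c for every c of l
lemma pv_mem_foldl_add {α γ : Type} [BEq α] [LawfulBEq α] (l : List γ) (f : γ → α)
    (s0 : PySem.Set α) (x : α) :
    x ∈ l.foldl (fun s c => PySem.Set.add s (f c)) s0 ↔ x ∈ s0 ∨ ∃ c ∈ l, f c = x := by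
  induction l generalizing s0 with
  | nil => simp
  | cons c cs ih =>
    simp only [List.foldl_cons, ih, PySem.Set.mem_add, List.mem_cons]
    constructor
    · rintro ((h | h) | ⟨d, hd, he⟩)
      exacts [Or.inl h, Or.inr ⟨c, Or.inl rfl, h.symm⟩, Or.inr ⟨d, Or.inr hd, he⟩]
    · rintro (h | ⟨d, rfl | hd, he⟩)
      exacts [Or.inl (Or.inl h), Or.inl (Or.inr he.symm), Or.inr ⟨d, hd, he⟩]

-- membership in B's nested substring-set construction
lemma pv_mem_foldl_foldl_add {α β γ : Type} [BEq α] [LawfulBEq α] (l : List β)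
    (g : β → List γ) (h : β → γ → α) (s0 : PySem.Set α) (x : α) :
    x ∈ l.foldl (fun acc n => (g n).foldl (fun a i => PySem.Set.add a (h n i)) acc) s0
    ↔ x ∈ s0 ∨ ∃ n ∈ l, ∃ i ∈ g n, h n i = x := by
  induction l generalizing s0 with
  | nil => simp
  | cons b bs ih =>
    simp only [List.foldl_cons, ih, pv_mem_foldl_add, List.mem_cons]
    constructor
    · rintro ((h1 | ⟨i, hi, he⟩) | ⟨n, hn, i, hi, he⟩)
      exacts [Or.inl h1, Or.inr ⟨b, Or.inl rfl, i, hi, he⟩, Or.inr ⟨n, Or.inr hn, i, hi, he⟩]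
    · rintro (h1 | ⟨n, rfl | hn, i, hi, he⟩)
      exacts [Or.inl (Or.inl h1), Or.inl (Or.inr ⟨i, hi, he⟩), Or.inr ⟨n, hn, i, hi, he⟩]

-- the key point: for a keyword k whose length is indexed, membership in B's substring set
-- is exactly "k occurs in sent", i.e. A's find(k) >= 0
lemma pv_subs_iff (sent k : String) (lengths : PySem.Set Int)
    (hlen : PySem.Str.len k ∈ lengths) (hnn : ∀ n ∈ lengths, 0 ≤ n) :
    (k ∈ List.foldl (fun acc n =>
        (PySem.List.pyRange 0 (PySem.Str.len sent - n + 1)).foldl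
          (fun acc2 i => PySem.Set.add acc2 (PySem.Str.slice sent (some i) (some (i + n)))) acc)
      PySem.Set.empty lengths)
    ↔ k.toList <:+: sent.toList := by
  rw [pv_mem_foldl_foldl_add (lengths : List Int)
      (fun n => PySem.List.pyRange 0 (PySem.Str.len sent - n + 1))
      (fun n i => PySem.Str.slice sent (some i) (some (i + n))) PySem.Set.empty k]
  constructor
  · rintro (h | ⟨n, hn, i, hi, he⟩)
    · simp [PySem.Set.empty] at h
    · have hn0 : 0 ≤ n := hnn n hn
      rcases PySem.List.mem_pyRange_one.mp hi with ⟨hi0, _⟩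
      have : k.toList = List.take ((i + n).toNat - i.toNat) (List.drop i.toNat sent.toList) := by
        rw [← he]
        simp only [PySem.Str.toList_slice, PySem.Chars.slice_eq_listSlice]
        rw [PySem.List.slice_toNat sent.toList hi0 (by omega)]
      rw [this]
      exact List.infix_iff_prefix_suffix.mpr
        ⟨List.drop i.toNat sent.toList, List.take_prefix _ _, List.drop_suffix _ _⟩
  · intro hinf
    rcases List.infix_iff_prefix_suffix.mp hinf with ⟨t, hp, hs⟩
    rcases hs with ⟨u, hu⟩
    have ht : t = sent.toList.drop u.length := by rw [← hu]; simp
    have hkt : k.toList = t.take k.toList.length := List.prefix_iff_eq_take.mp hp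
    have hlt : k.toList.length ≤ t.length := hp.length_le
    have htl : t.length = sent.toList.length - u.length := by rw [ht]; simp
    have hub : u.length ≤ sent.toList.length := by
      rw [← hu]; simp
    refine Or.inr ⟨PySem.Str.len k, hlen, (u.length : Int), ?_, ?_⟩
    · rw [PySem.List.mem_pyRange_one]
      refine ⟨by positivity, ?_⟩
      simp only [PySem.Str.len_eq]
      omega
    · apply String.toList_inj.mp
      simp only [PySem.Str.toList_slice, PySem.Chars.slice_eq_listSlice, PySem.Str.len_eq]
      rw [PySem.List.slice_toNat sent.toList (by positivity) (by positivity)]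
      have h1 : ((u.length : Int) + (k.toList.length : Int)).toNat - ((u.length : Int)).toNat
          = k.toList.length := by omega
      rw [h1, Int.toNat_natCast, ← ht, ← hkt]

-- A's outer loop: with counter = length of the accumulated list, it appends one score per sentence
lemma pv_A_fold (score1 score2 score3 : List (String × Int)) :
    ∀ (ms : List String) (pre : List Int),
    (ms.foldl
      (fun (st : List Int × Int) sent =>
        let sentenceScore := st.1 ++ [0]
        let counter := st.2
        let sentenceScore := (PySem.List.pyRange 0 (score1.length : Int)).foldl
          (fun ss i =>
            if 0 ≤ PySem.Str.find sent (PySem.List.pyGetD score1 i ("", 0)).1 then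
              PySem.List.pySetD ss counter (PySem.List.pyGetD ss counter 0 + (PySem.List.pyGetD score1 i ("", 0)).2)
            else ss) sentenceScore
        let sentenceScore := (PySem.List.pyRange 0 (score2.length : Int)).foldl
          (fun ss i =>
            if 0 ≤ PySem.Str.find sent (PySem.List.pyGetD score2 i ("", 0)).1 then
              PySem.List.pySetD ss counter (PySem.List.pyGetD ss counter 0 + (PySem.List.pyGetD score2 i ("", 0)).2)
            else ss) sentenceScore
        let sentenceScore := (PySem.List.pyRange 0 (score3.length : Int)).foldl
          (fun ss i =>
            if 0 ≤ PySem.Str.find sent (PySem.List.pyGetD score3 i ("", 0)).1 then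
              PySem.List.pySetD ss counter (PySem.List.pyGetD ss counter 0 + (PySem.List.pyGetD score3 i ("", 0)).2)
          else ss) sentenceScore
        (sentenceScore, counter + 1))
      (pre, (pre.length : Int))).1
    = pre ++ ms.map (fun sent =>
        score3.foldl (fun t q => if 0 ≤ PySem.Str.find sent q.1 then t + q.2 else t)
          (score2.foldl (fun t q => if 0 ≤ PySem.Str.find sent q.1 then t + q.2 else t)
            (score1.foldl (fun t q => if 0 ≤ PySem.Str.find sent q.1 then t + q.2 else t) 0))) := by
  intro ms
  induction ms with
  | nil => intro pre; simp
  | cons sent rest ih =>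
    intro pre
    simp only [List.foldl_cons, pv_inner, List.map_cons]
    have hc : (pre.length : Int) + 1 = (((pre ++ [score3.foldl (fun (t : Int) (q : String × Int) => if 0 ≤ PySem.Str.find sent q.1 then t + q.2 else t)
          (score2.foldl (fun (t : Int) (q : String × Int) => if 0 ≤ PySem.Str.find sent q.1 then t + q.2 else t)
            (score1.foldl (fun (t : Int) (q : String × Int) => if 0 ≤ PySem.Str.find sent q.1 then t + q.2 else t) 0))]).length : Int)) := by simp
    rw [hc, ih (pre ++ [score3.foldl (fun (t : Int) (q : String × Int) => if 0 ≤ PySem.Str.find sent q.1 then t + q.2 else t)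
          (score2.foldl (fun (t : Int) (q : String × Int) => if 0 ≤ PySem.Str.find sent q.1 then t + q.2 else t)
            (score1.foldl (fun (t : Int) (q : String × Int) => if 0 ≤ PySem.Str.find sent q.1 then t + q.2 else t) 0))]), List.append_assoc, List.singleton_append]

-- per-sentence values agree: find ≥ 0 ↔ membership in B's substring set
lemma pv_val (score1 score2 score3 : List (String × Int)) (sent : String) :
    score3.foldl (fun t q => if 0 ≤ PySem.Str.find sent q.1 then t + q.2 else t)
      (score2.foldl (fun t q => if 0 ≤ PySem.Str.find sent q.1 then t + q.2 else t)
        (score1.foldl (fun t q => if 0 ≤ PySem.Str.find sent q.1 then t + q.2 else t) 0))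
    = (score1 ++ score2 ++ score3).foldl
        (fun t p => if PySem.Set.contains
            (List.foldl (fun acc n =>
              (PySem.List.pyRange 0 (PySem.Str.len sent - n + 1)).foldl
                (fun acc2 i => PySem.Set.add acc2 (PySem.Str.slice sent (some i) (some (i + n)))) acc)
              PySem.Set.empty
              (PySem.Set.ofList ((score1 ++ score2 ++ score3).map (fun p => PySem.Str.len p.1))))
            p.1 then t + p.2 else t) 0 := by
  set kw := score1 ++ score2 ++ score3 with hkw
  set lengths := PySem.Set.ofList (kw.map (fun p => PySem.Str.len p.1)) with hlens
  set subs := List.foldl (fun acc n =>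
      (PySem.List.pyRange 0 (PySem.Str.len sent - n + 1)).foldl
        (fun acc2 i => PySem.Set.add acc2 (PySem.Str.slice sent (some i) (some (i + n)))) acc)
      PySem.Set.empty lengths with hsubs
  have hnn : ∀ n ∈ lengths, 0 ≤ n := by
    intro n hn
    rw [hlens, PySem.Set.mem_ofList] at hn
    rcases List.mem_map.mp hn with ⟨p, _, rfl⟩
    simp [PySem.Str.len_eq]
  have hcond : ∀ (q : String × Int), q ∈ kw → ∀ (t : Int),
      (if 0 ≤ PySem.Str.find sent q.1 then t + q.2 else t)
      = (if PySem.Set.contains subs q.1 then t + q.2 else t) := by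
    intro q hq t
    have hlen : PySem.Str.len q.1 ∈ lengths := by
      rw [hlens, PySem.Set.mem_ofList]
      exact List.mem_map_of_mem hq
    have hiff : (0 ≤ PySem.Str.find sent q.1) ↔ (PySem.Set.contains subs q.1 = true) := by
      rw [PySem.Str.find_nonneg_iff, PySem.Set.contains_iff, hsubs,
        pv_subs_iff sent q.1 lengths hlen hnn]
    exact if_congr hiff rfl rfl
  have h1 : ∀ init, score1.foldl (fun t q => if 0 ≤ PySem.Str.find sent q.1 then t + q.2 else t) init
      = score1.foldl (fun t p => if PySem.Set.contains subs p.1 then t + p.2 else t) init := by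
    intro init
    exact PySem.List.foldl_congr_mem _ _ _ _ (fun t q hq => hcond q (by simp [hkw, hq]) t)
  have h2 : ∀ init, score2.foldl (fun t q => if 0 ≤ PySem.Str.find sent q.1 then t + q.2 else t) init
      = score2.foldl (fun t p => if PySem.Set.contains subs p.1 then t + p.2 else t) init := by
    intro init
    exact PySem.List.foldl_congr_mem _ _ _ _ (fun t q hq => hcond q (by simp [hkw, hq]) t)
  have h3 : ∀ init, score3.foldl (fun t q => if 0 ≤ PySem.Str.find sent q.1 then t + q.2 else t) init
      = score3.foldl (fun t p => if PySem.Set.contains subs p.1 then t + p.2 else t) init := by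
    intro init
    exact PySem.List.foldl_congr_mem _ _ _ _ (fun t q hq => hcond q (by simp [hkw, hq]) t)
  rw [hkw, List.foldl_append, List.foldl_append, h1, h2, h3]

-- ===== VERDICT (by name: the statement is the Claim_ definition above) =====
theorem sentence_score_spec : Claim_equal_sentence_score := by
  intro ms s1 s2 s3 _
  unfold Spec_sentence_score sentence_score sentence_score_alt
  have hA := pv_A_fold s1 s2 s3 ms []
  simp only [List.length_nil, Nat.cast_zero, List.nil_append] at hA
  rw [hA]
  exact List.map_congr_left (fun sent _ => pv_val s1 s2 s3 sent)
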